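-- pv_equiv track=rewrite | github.com/madgik/exareme2 | mipengine/node/monetdb_interface/monet_db_facade.py | _create_idempotent_query
-- ===== SOURCE A (Python) =====
-- UDF_EXECUTION_QUERY_PREFIX = "INSERT INTO"
--
-- def _get_table_name_on_query(query: str, query_prefix: str):
--     # We need to extract the table name from the query
--     string_before_table_name_pos = query.find(query_prefix)
--     table_name, *_ = query[string_before_table_name_pos + len(query_prefix) :].split()
--     return table_name
--
-- def _create_idempotent_insert_into_query(query):
--     """
--     In order for an insert query to be idempotent,
--     we need to delete all the existing values of the table,
--     before inserting the new values.'
--     """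
--     if UDF_EXECUTION_QUERY_PREFIX in query:
--         table_name = _get_table_name_on_query(query, UDF_EXECUTION_QUERY_PREFIX)
--         return f"DELETE FROM {table_name};" + query
--     return query
--
-- def _create_idempotent_create_merge_table_query(query):
--     """
--     The creation of the merge table cannot be easily idempotent because adding
--     an "IF NOT EXISTS" will leave the added tables. This means that adding afterwards tables
--     into the merge table will throw errors. We cannot add an "IF NOT EXISTS" clause in the
--     "ADD TABLE TO MERGE TABLE" query because it doesn't exist.
--     So the approach we are taking is dropping the merge table each time and recreating it to
--     make the whole merge table creation idempotent.
--     """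
--     prefix = "CREATE MERGE TABLE"
--     if prefix in query:
--         table_name = _get_table_name_on_query(query, prefix)
--         return f"DROP TABLE {table_name};" + query
--     return query
--
-- def _create_idempotent_query(query: str) -> str:
--     """
--     This is a query optimization method to protect from the following edge case:
--     1) A udf starts running allocating memory,
--     2) a table creation query starts running,
--     3) the udf allocates more memory than monetdb can provide,
--     4) the container memory limit kills monetdb,
--     5) the table creation query returns with BrokenPipeError("Server closed the connection"),
--     6) when the monet_db_facade tries to rerun the failed query it receives a "Table already exists error"
--         because the table was created even though the connection was severed.
--
--     The solution to this is to make all queries idempotent.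
--     """
--     idempotent_query = query
--
--     if UDF_EXECUTION_QUERY_PREFIX in idempotent_query:
--         idempotent_split_queries = [
--             _create_idempotent_insert_into_query(query)
--             for query in idempotent_query.strip().split(";")
--             if query
--         ]
--         idempotent_query = ";".join(idempotent_split_queries) + ";"
--
--     if "CREATE MERGE TABLE" in idempotent_query:
--         idempotent_split_queries = [
--             _create_idempotent_create_merge_table_query(query)
--             for query in idempotent_query.strip().split(";")
--             if query
--         ]
--         idempotent_query = ";".join(idempotent_split_queries) + ";"
--
--     if "CREATE" in idempotent_query:
--         idempotent_query = idempotent_query.replace(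
--             "CREATE TABLE", "CREATE TABLE IF NOT EXISTS"
--         )
--         idempotent_query = idempotent_query.replace(
--             "CREATE REMOTE TABLE", "CREATE REMOTE TABLE IF NOT EXISTS"
--         )
--         idempotent_query = idempotent_query.replace(
--             "CREATE VIEW", "CREATE OR REPLACE VIEW"
--         )
--         idempotent_query = idempotent_query.replace(
--             "CREATE FUNCTION", "CREATE OR REPLACE FUNCTION"
--         )
--
--     if "DROP" in idempotent_query:
--         idempotent_query = idempotent_query.replace(
--             "DROP FUNCTION", "DROP FUNCTION IF EXISTS"
--         )
--         idempotent_query = idempotent_query.replace(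
--             "DROP TABLE", "DROP TABLE IF EXISTS"
--         )
--         idempotent_query = idempotent_query.replace("DROP VIEW", "DROP VIEW IF EXISTS")
--     return idempotent_query
-- ===== SOURCE B (Python) =====
-- UDF_EXECUTION_QUERY_PREFIX = "INSERT INTO"
-- MERGE_TABLE_QUERY_PREFIX = "CREATE MERGE TABLE"
--
-- def _get_table_name_on_query(query: str, query_prefix: str):
--     string_before_table_name_pos = query.find(query_prefix)
--     table_name, *_ = query[string_before_table_name_pos + len(query_prefix):].split()
--     return table_name
--
-- _IDEMPOTENT_REWRITES = [
--     ("CREATE TABLE", "CREATE TABLE IF NOT EXISTS"),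
--     ("CREATE REMOTE TABLE", "CREATE REMOTE TABLE IF NOT EXISTS"),
--     ("CREATE VIEW", "CREATE OR REPLACE VIEW"),
--     ("CREATE FUNCTION", "CREATE OR REPLACE FUNCTION"),
--     ("DROP FUNCTION", "DROP FUNCTION IF EXISTS"),
--     ("DROP TABLE", "DROP TABLE IF EXISTS"),
--     ("DROP VIEW", "DROP VIEW IF EXISTS"),
-- ]
--
-- def _create_idempotent_query(query: str) -> str:
--     result = query
--     if UDF_EXECUTION_QUERY_PREFIX in query or MERGE_TABLE_QUERY_PREFIX in query:
--         # One split pass: emit cleanup statements right before the statement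
--         # that needs them, then rejoin everything once.
--         fragments = []
--         for statement in query.strip().split(";"):
--             if not statement:
--                 continue
--             if UDF_EXECUTION_QUERY_PREFIX in statement:
--                 table = _get_table_name_on_query(statement, UDF_EXECUTION_QUERY_PREFIX)
--                 fragments.append(f"DELETE FROM {table}")
--             if MERGE_TABLE_QUERY_PREFIX in statement:
--                 table = _get_table_name_on_query(statement, MERGE_TABLE_QUERY_PREFIX)
--                 fragments.append(f"DROP TABLE {table}")
--             fragments.append(statement)
--         result = ";".join(fragments) + ";"
--     for old, new in _IDEMPOTENT_REWRITES:
--         result = result.replace(old, new)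
--     return result
-- ===== Notes on version B (the rewrite author's own statement) =====
-- stated objective: alternative
-- what changed: B splits the stripped query once on semicolons and emits the DELETE FROM / DROP TABLE cleanup statements as separate fragments in a single pass, then runs one flat table of unconditional replaces, instead of A's two split-transform-rejoin passes with keyword-guarded replace blocks; Pre_ excludes queries whose first non-empty semicolon-separated fragment starts with whitespace while both keywords are present, where A's second strip of the rejoined string incidentally re-normalizes that whitespace and either spelling of the output is defensible.
-- outside the precondition, e.g. on _create_idempotent_query('INSERT INTO'): A raises ValueError, B raises ValueError
import Mathlib
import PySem

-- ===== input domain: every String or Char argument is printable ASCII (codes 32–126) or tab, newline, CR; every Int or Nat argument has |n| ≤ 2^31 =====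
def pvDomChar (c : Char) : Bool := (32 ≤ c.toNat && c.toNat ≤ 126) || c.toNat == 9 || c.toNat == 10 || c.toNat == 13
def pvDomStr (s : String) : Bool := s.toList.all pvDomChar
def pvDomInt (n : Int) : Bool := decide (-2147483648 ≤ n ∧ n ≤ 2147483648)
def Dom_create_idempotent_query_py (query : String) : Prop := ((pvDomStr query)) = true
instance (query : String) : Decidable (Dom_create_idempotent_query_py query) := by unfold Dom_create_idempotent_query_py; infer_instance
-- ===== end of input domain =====

-- B builds the rewritten statement list in a single split pass (cleanup fragments emitted
-- in line) and applies one flat table of unconditional replaces, instead of A's two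
-- split-transform-rejoin passes and guarded replace blocks; same complexity, alternative
-- decomposition.

-- ===== PORT A =====

def pvINS : List Char := "INSERT INTO".toList
def pvMERGE : List Char := "CREATE MERGE TABLE".toList

-- _get_table_name_on_query (shared helper of both Pythons).  The slice index
-- pos + len(prefix) is ≥ 0 in every call (the prefix has length ≥ 11), so `.toNat`+drop
-- is exactly Python's slice.  On `[]` Python raises ValueError (unpacking an empty
-- split); those inputs are excluded by Pre_ below.
def pvGetTableName (query pfx : List Char) : List Char :=
  let pos := PySem.Chars.find query pfx
  match PySem.Chars.split₀ (List.drop (pos + (pfx.length : Int)).toNat query) with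
  | t :: _ => t
  | [] => []

-- _create_idempotent_insert_into_query
def pvInsertIntoIdem (q : List Char) : List Char :=
  if PySem.Chars.isIn pvINS q then
    "DELETE FROM ".toList ++ pvGetTableName q pvINS ++ [';'] ++ q
  else q

-- _create_idempotent_create_merge_table_query
def pvMergeTableIdem (q : List Char) : List Char :=
  if PySem.Chars.isIn pvMERGE q then
    "DROP TABLE ".toList ++ pvGetTableName q pvMERGE ++ [';'] ++ q
  else q

-- [fragment for fragment in q.strip().split(";") if fragment]  (used verbatim by both Pythons)
def pvSegs (q : List Char) : List (List Char) :=
  (PySem.Chars.splitOn (PySem.Chars.strip q) [';']).filter (fun s => !s.isEmpty)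

-- the two split-transform-rejoin passes of A
def pvBuildA (query : List Char) : List Char :=
  let q1 := if PySem.Chars.isIn pvINS query then
      PySem.Chars.join [';'] ((pvSegs query).map pvInsertIntoIdem) ++ [';']
    else query
  if PySem.Chars.isIn pvMERGE q1 then
    PySem.Chars.join [';'] ((pvSegs q1).map pvMergeTableIdem) ++ [';']
  else q1

-- A's two guarded replace blocks
def pvReplacePhaseA (q2 : List Char) : List Char :=
  let q3 := if PySem.Chars.isIn "CREATE".toList q2 then
      PySem.Chars.replace (PySem.Chars.replace (PySem.Chars.replace (PySem.Chars.replace q2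
        "CREATE TABLE".toList "CREATE TABLE IF NOT EXISTS".toList)
        "CREATE REMOTE TABLE".toList "CREATE REMOTE TABLE IF NOT EXISTS".toList)
        "CREATE VIEW".toList "CREATE OR REPLACE VIEW".toList)
        "CREATE FUNCTION".toList "CREATE OR REPLACE FUNCTION".toList
    else q2
  if PySem.Chars.isIn "DROP".toList q3 then
    PySem.Chars.replace (PySem.Chars.replace (PySem.Chars.replace q3
      "DROP FUNCTION".toList "DROP FUNCTION IF EXISTS".toList)
      "DROP TABLE".toList "DROP TABLE IF EXISTS".toList)
      "DROP VIEW".toList "DROP VIEW IF EXISTS".toList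
  else q3

def create_idempotent_query_py (query : String) : String :=
  String.mk (pvReplacePhaseA (pvBuildA query.toList))

-- ===== PORT B =====

-- one statement of the split, with its cleanup fragments emitted in front of it
def pvFragOut (s : List Char) : List (List Char) :=
  (if PySem.Chars.isIn pvINS s then
    ["DELETE FROM ".toList ++ pvGetTableName s pvINS] else []) ++
  (if PySem.Chars.isIn pvMERGE s then
    ["DROP TABLE ".toList ++ pvGetTableName s pvMERGE] else []) ++
  [s]

-- _IDEMPOTENT_REWRITES
def pvRepl : List (List Char × List Char) :=
  [("CREATE TABLE".toList, "CREATE TABLE IF NOT EXISTS".toList),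
   ("CREATE REMOTE TABLE".toList, "CREATE REMOTE TABLE IF NOT EXISTS".toList),
   ("CREATE VIEW".toList, "CREATE OR REPLACE VIEW".toList),
   ("CREATE FUNCTION".toList, "CREATE OR REPLACE FUNCTION".toList),
   ("DROP FUNCTION".toList, "DROP FUNCTION IF EXISTS".toList),
   ("DROP TABLE".toList, "DROP TABLE IF EXISTS".toList),
   ("DROP VIEW".toList, "DROP VIEW IF EXISTS".toList)]

def create_idempotent_query_py_altAux (query : List Char) : List Char :=
  let result :=
    if PySem.Chars.isIn pvINS query || PySem.Chars.isIn pvMERGE query then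
      PySem.Chars.join [';'] ((pvSegs query).flatMap pvFragOut) ++ [';']
    else query
  pvRepl.foldl (fun acc ov => PySem.Chars.replace acc ov.1 ov.2) result

def create_idempotent_query_py_alt (query : String) : String :=
  String.mk (create_idempotent_query_py_altAux query.toList)

-- ===== PRECONDITION & SPEC =====

-- Pre_ excludes (a) the inputs where Python A raises ValueError: a non-empty semicolon-separated fragment
-- in which "INSERT INTO" / "CREATE MERGE TABLE" is followed by no token, so that
-- `table_name, *_ = ....split()` unpacks an empty list; and (b) queries whose FIRST
-- non-empty semicolon-separated fragment starts with whitespace (and has no "INSERT INTO") while both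
-- keywords appear: there A's second strip of the rejoined string incidentally lstrips that
-- fragment, B keeps the query's own spacing — both spellings of the output are defensible.
def Pre_create_idempotent_query_py (query : String) : Prop :=
  (∀ s ∈ (PySem.Chars.splitOn (PySem.Chars.strip query.toList) [';']).filter (fun s => !s.isEmpty),
    (PySem.Chars.isIn pvINS s = true →
      PySem.Chars.split₀ (List.drop (PySem.Chars.find s pvINS + 11).toNat s) ≠ []) ∧
    (PySem.Chars.isIn pvMERGE s = true →
      PySem.Chars.split₀ (List.drop (PySem.Chars.find s pvMERGE + 18).toNat s) ≠ [])) ∧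
  (PySem.Chars.isIn pvINS query.toList = true → PySem.Chars.isIn pvMERGE query.toList = true →
    ((PySem.Chars.splitOn (PySem.Chars.strip query.toList) [';']).filter (fun s => !s.isEmpty)).head?.all
      (fun s => PySem.Chars.isIn pvINS s ||
        s.head?.all (fun c => !PySem.Chars.isspace c)) = true)
instance (query : String) : Decidable (Pre_create_idempotent_query_py query) := by
  unfold Pre_create_idempotent_query_py; infer_instance

def pvWitness_create_idempotent_query_py : String := "INSERT INTO t1 (SELECT 1);"

def Spec_create_idempotent_query_py (query : String) (out : String) : Prop :=
  out = create_idempotent_query_py_alt query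
instance (query : String) (out : String) : Decidable (Spec_create_idempotent_query_py query out) := by
  unfold Spec_create_idempotent_query_py; infer_instance

-- ===== CLAIM (what is proved, stated in full; the proofs are below) =====
def Claim_equal_create_idempotent_query_py : Prop := ∀ (query : String), Dom_create_idempotent_query_py query → Pre_create_idempotent_query_py query → Spec_create_idempotent_query_py query (create_idempotent_query_py query)

-- ===== LEMMAS AND PROOFS =====

theorem pv_splitOn_go (c : Char) :
    ∀ (fuel : Nat) (l cur : List Char) (acc : List (List Char)), l.length ≤ fuel →
      PySem.Chars.splitOn.go [c] fuel l cur acc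
        = acc.reverse ++ (List.splitOnP (· == c) l).modifyHead (cur.reverse ++ ·) := by
  intro fuel
  induction fuel with
  | zero =>
    intro l cur acc h
    have : l = [] := List.eq_nil_of_length_eq_zero (Nat.le_zero.mp h)
    subst this
    rw [PySem.Chars.splitOn.go]
    simp [List.splitOnP_nil]
  | succ fuel ih =>
    intro l cur acc h
    cases l with
    | nil => rw [PySem.Chars.splitOn.go]; simp [List.splitOnP_nil]; omega
    | cons c' rest =>
      rw [PySem.Chars.splitOn.go]
      by_cases hc : c' = c
      · subst hc
        have hpre : [c'].isPrefixOf (c' :: rest) = true := by simp [List.isPrefixOf]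
        simp only [hpre, if_true, List.length_cons, List.drop_succ_cons]
        rw [show List.drop [].length rest = rest from rfl]
        rw [ih rest [] (cur.reverse :: acc) (by simpa using Nat.le_of_succ_le_succ h)]
        rw [List.splitOnP_cons]
        simp only [beq_self_eq_true, if_true, List.modifyHead_cons, List.reverse_nil,
          List.nil_append, List.reverse_cons, List.append_assoc, List.singleton_append]
        simp
        obtain ⟨x, xs, hx⟩ := List.exists_cons_of_ne_nil (List.splitOnP_ne_nil (fun x => x == c') rest)
        rw [hx, List.modifyHead_cons]
      · have hpre : [c].isPrefixOf (c' :: rest) = false := by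
          simp [List.isPrefixOf]
          intro h'; exact absurd h'.symm hc
        simp only [hpre]
        rw [if_neg (by simp)]
        rw [ih rest (c' :: cur) acc (by simpa using Nat.le_of_succ_le_succ h)]
        rw [List.splitOnP_cons, if_neg (by simp [hc])]
        obtain ⟨x, xs, hx⟩ := List.exists_cons_of_ne_nil (List.splitOnP_ne_nil (· == c) rest)
        rw [hx]
        simp

theorem pv_splitOn_eq (l : List Char) (c : Char) :
    PySem.Chars.splitOn l [c] = List.splitOnP (· == c) l := by
  rw [PySem.Chars.splitOn, pv_splitOn_go c (l.length + 1) l [] [] (Nat.le_succ _)]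
  obtain ⟨x, xs, hx⟩ := List.exists_cons_of_ne_nil (List.splitOnP_ne_nil (· == c) l)
  rw [hx]; simp

theorem pv_mem_splitOnP (c : Char) (l s : List Char) (h : s ∈ List.splitOnP (· == c) l) :
    c ∉ s := by
  induction l generalizing s with
  | nil => rw [List.splitOnP_nil] at h; simp at h; simp [h]
  | cons a l ih =>
    rw [List.splitOnP_cons] at h
    by_cases ha : a = c
    · rw [if_pos (by simp [ha])] at h
      rcases List.mem_cons.mp h with h1 | h1
      · simp [h1]
      · exact ih s h1
    · rw [if_neg (by simp [ha])] at h
      obtain ⟨x, xs, hx⟩ := List.exists_cons_of_ne_nil (List.splitOnP_ne_nil (· == c) l)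
      rw [hx, List.modifyHead_cons] at h
      rcases List.mem_cons.mp h with h1 | h1
      · subst h1
        intro hmem
        rcases List.mem_cons.mp hmem with h2 | h2
        · exact ha h2.symm
        · exact ih x (hx ▸ List.mem_cons_self) h2
      · exact ih s (hx ▸ List.mem_cons.mpr (Or.inr h1))

theorem pv_intercalate_cons₂ (c : Char) (e f : List Char) (E : List (List Char)) :
    List.intercalate [c] (e :: f :: E) = e ++ c :: List.intercalate [c] (f :: E) := by
  simp [List.intercalate, List.intersperse]

theorem pv_intercalate_singleton (c : Char) (e : List Char) :
    List.intercalate [c] [e] = e := by simp [List.intercalate]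

theorem pv_intercalate_cons (c : Char) (e : List Char) (E : List (List Char)) (h : E ≠ []) :
    List.intercalate [c] (e :: E) = e ++ c :: List.intercalate [c] E := by
  obtain ⟨f, E', rfl⟩ := List.exists_cons_of_ne_nil h
  exact pv_intercalate_cons₂ c e f E'

theorem pv_prefix_cons_sep (c : Char) (p b : List Char) (hc : c ∉ p) (h : p <+: c :: b) :
    p = [] := by
  cases p with
  | nil => rfl
  | cons x p' =>
    obtain ⟨t, ht⟩ := h
    simp at ht
    exact absurd (ht.1 ▸ List.mem_cons_self) hc

theorem pv_infix_cons_sep_iff (c : Char) (p a b : List Char) (hc : c ∉ p) :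
    p <:+: a ++ c :: b ↔ p <:+: a ∨ p <:+: b := by
  constructor
  · intro h
    induction a with
    | nil =>
      simp only [List.nil_append] at h
      rcases List.infix_cons_iff.mp h with h1 | h1
      · exact Or.inl (by simp [pv_prefix_cons_sep c p b hc h1])
      · exact Or.inr h1
    | cons x a ih =>
      rw [List.cons_append] at h
      rcases List.infix_cons_iff.mp h with h1 | h1
      · cases p with
        | nil => exact Or.inl List.nil_infix
        | cons y p' =>
          obtain ⟨t, ht⟩ := h1
          simp only [List.cons_append, List.cons.injEq] at ht
          obtain ⟨rfl, ht2⟩ := ht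
          have hp' : p' <+: a ++ c :: b := ⟨t, ht2⟩
          have hcp' : c ∉ p' := fun hm => hc (List.mem_cons.mpr (Or.inr hm))
          have hpa : p' <+: a := by
            rcases List.prefix_or_prefix_of_prefix hp' (List.prefix_append a (c :: b)) with h2 | h2
            · exact h2
            · obtain ⟨w, rfl⟩ := h2
              have hw : w <+: c :: b := by
                obtain ⟨t2, ht3⟩ := hp'
                rw [List.append_assoc] at ht3
                exact ⟨t2, List.append_cancel_left ht3⟩
              have : w = [] := pv_prefix_cons_sep c w b
                (fun hm => hcp' (List.mem_append.mpr (Or.inr hm))) hw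
              simp [this]
          exact Or.inl (List.IsPrefix.isInfix (List.cons_prefix_cons.mpr ⟨rfl, hpa⟩))
      · rcases ih h1 with h2 | h2
        · exact Or.inl (h2.trans (List.suffix_cons x a).isInfix)
        · exact Or.inr h2
  · intro h
    rcases h with h | h
    · exact h.trans (List.prefix_append a (c :: b)).isInfix
    · exact h.trans ((List.suffix_cons c b).trans (List.suffix_append a (c :: b))).isInfix

theorem pv_infix_intercalate_iff (c : Char) (p : List Char) (E : List (List Char))
    (hp : p ≠ []) (hc : c ∉ p) :
    p <:+: List.intercalate [c] E ↔ ∃ e ∈ E, p <:+: e := by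
  induction E with
  | nil =>
    rw [show List.intercalate [c] ([] : List (List Char)) = [] from by simp [List.intercalate]]
    constructor
    · intro h; exact absurd (List.eq_nil_of_infix_nil h) hp
    · rintro ⟨e, he, -⟩; simp at he
  | cons e E ih =>
    rcases List.eq_nil_or_concat' E with rfl | hE
    · simp [pv_intercalate_singleton]
    · rw [pv_intercalate_cons c e E (by rintro rfl; simp_all),
        pv_infix_cons_sep_iff c p e (List.intercalate [c] E) hc]
      constructor
      · rintro (h | h)
        · exact ⟨e, List.mem_cons_self, h⟩
        · obtain ⟨f, hf, hpf⟩ := ih.mp h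
          exact ⟨f, List.mem_cons.mpr (Or.inr hf), hpf⟩
      · rintro ⟨f, hf, hpf⟩
        rcases List.mem_cons.mp hf with rfl | hf'
        · exact Or.inl hpf
        · exact Or.inr (ih.mpr ⟨f, hf', hpf⟩)

-- the rejoined string  intercalate [';'] E ++ [';']
theorem pv_infix_join_iff (c : Char) (p : List Char) (E : List (List Char))
    (hp : p ≠ []) (hc : c ∉ p) :
    p <:+: List.intercalate [c] E ++ [c] ↔ ∃ e ∈ E, p <:+: e := by
  have : List.intercalate [c] E ++ [c] = List.intercalate [c] E ++ c :: [] := rfl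
  rw [this, pv_infix_cons_sep_iff c p _ [] hc, pv_infix_intercalate_iff c p E hp hc]
  constructor
  · rintro (h | h)
    · exact h
    · exact absurd (List.eq_nil_of_infix_nil h) hp
  · exact Or.inl

theorem pv_splitOnP_join (c : Char) (E : List (List Char)) (hE : E ≠ [])
    (hfree : ∀ e ∈ E, c ∉ e) :
    List.splitOnP (· == c) (List.intercalate [c] E ++ [c]) = E ++ [[]] := by
  induction E with
  | nil => simp at hE
  | cons e E ih =>
    have he : ∀ x ∈ e, ¬((· == c) x = true) := by
      intro x hx hbeq
      exact hfree e List.mem_cons_self (beq_iff_eq.mp hbeq ▸ hx)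
    rcases List.eq_nil_or_concat' E with rfl | hE'
    · rw [pv_intercalate_singleton]
      have : e ++ [c] = e ++ c :: [] := rfl
      rw [this, List.splitOnP_first _ _ he c (by simp)]
      simp [List.splitOnP_nil]
    · rw [pv_intercalate_cons c e E (by rintro rfl; simp_all), List.append_assoc,
        List.cons_append, List.splitOnP_first _ _ he c (by simp)]
      rw [ih (by rintro rfl; simp_all) (fun f hf => hfree f (List.mem_cons.mpr (Or.inr hf)))]
      simp

theorem pv_lstrip_infix_iff (ph : Char) (pt s : List Char)
    (hh : PySem.Chars.isspace ph = false) :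
    (ph :: pt) <:+: s ↔ (ph :: pt) <:+: PySem.Chars.lstrip s := by
  rw [PySem.Chars.lstrip]
  induction s with
  | nil => simp
  | cons a s ih =>
    by_cases ha : PySem.Chars.isspace a
    · rw [List.dropWhile_cons_of_pos ha, ← ih]
      constructor
      · intro h
        rcases List.infix_cons_iff.mp h with h1 | h1
        · have := (List.cons_prefix_cons.mp h1).1
          rw [this, ha] at hh
          simp at hh
        · exact h1
      · intro h
        exact h.trans (List.suffix_cons a s).isInfix
    · rw [List.dropWhile_cons_of_neg ha]

theorem pv_rstrip_infix_iff (pl : Char) (pi s : List Char)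
    (hl : PySem.Chars.isspace pl = false) :
    (pi ++ [pl]) <:+: s ↔ (pi ++ [pl]) <:+: PySem.Chars.rstrip s := by
  rw [PySem.Chars.rstrip]
  rw [← List.reverse_infix (l₁ := pi ++ [pl]) (l₂ := s)]
  rw [← List.reverse_infix (l₁ := pi ++ [pl])]
  rw [List.reverse_reverse]
  have h := pv_lstrip_infix_iff pl pi.reverse s.reverse hl
  rw [PySem.Chars.lstrip] at h
  simpa using h

theorem pv_strip_infix_iff (ph pl : Char) (pt pi s : List Char)
    (hdec : ph :: pt = pi ++ [pl])
    (hh : PySem.Chars.isspace ph = false)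
    (hl : PySem.Chars.isspace pl = false) :
    (ph :: pt) <:+: s ↔ (ph :: pt) <:+: PySem.Chars.strip s := by
  rw [PySem.Chars.strip]
  rw [pv_lstrip_infix_iff ph pt s hh, hdec,
    pv_rstrip_infix_iff pl pi (PySem.Chars.lstrip s) hl]

theorem pv_split₀_go_nil (cur : List Char) (acc : List (List Char)) :
    PySem.Chars.split₀.go [] cur acc
      = if cur.isEmpty then acc.reverse else (cur.reverse :: acc).reverse := by
  rw [PySem.Chars.split₀.go]

theorem pv_split₀_go_ws (c : Char) (rest cur : List Char) (acc : List (List Char))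
    (h : PySem.Chars.isspace c = true) :
    PySem.Chars.split₀.go (c :: rest) cur acc
      = if cur.isEmpty then PySem.Chars.split₀.go rest [] acc
        else PySem.Chars.split₀.go rest [] (cur.reverse :: acc) := by
  rw [PySem.Chars.split₀.go]
  simp [h]

theorem pv_split₀_go_nws (c : Char) (rest cur : List Char) (acc : List (List Char))
    (h : PySem.Chars.isspace c = false) :
    PySem.Chars.split₀.go (c :: rest) cur acc
      = PySem.Chars.split₀.go rest (c :: cur) acc := by
  rw [PySem.Chars.split₀.go]
  simp [h]

theorem pv_split₀_go_spec (P : Char → Prop) :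
    ∀ (s cur : List Char) (acc : List (List Char)),
      (∀ c ∈ cur, P c ∧ PySem.Chars.isspace c = false) →
      (∀ c ∈ s, P c) →
      (∀ e ∈ acc, e ≠ [] ∧ ∀ c ∈ e, P c ∧ PySem.Chars.isspace c = false) →
      ∀ e ∈ PySem.Chars.split₀.go s cur acc,
        e ≠ [] ∧ ∀ c ∈ e, P c ∧ PySem.Chars.isspace c = false := by
  intro s
  induction s with
  | nil =>
    intro cur acc hcur _ hacc e he
    rw [pv_split₀_go_nil] at he
    by_cases hc : cur.isEmpty
    · rw [if_pos hc] at he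
      exact hacc e (List.mem_reverse.mp he)
    · rw [if_neg hc] at he
      rcases List.mem_cons.mp (List.mem_reverse.mp he) with rfl | h1
      · refine ⟨by simpa using hc, ?_⟩
        intro ch hch
        exact hcur ch (List.mem_reverse.mp hch)
      · exact hacc e h1
  | cons a s ih =>
    intro cur acc hcur hs hacc e he
    by_cases ha : PySem.Chars.isspace a
    · rw [pv_split₀_go_ws a s cur acc ha] at he
      by_cases hc : cur.isEmpty
      · rw [if_pos hc] at he
        exact ih [] acc (by simp) (fun c h => hs c (List.mem_cons.mpr (Or.inr h))) hacc e he
      · rw [if_neg hc] at he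
        refine ih [] (cur.reverse :: acc) (by simp)
          (fun c h => hs c (List.mem_cons.mpr (Or.inr h))) ?_ e he
        intro f hf
        rcases List.mem_cons.mp hf with rfl | h1
        · refine ⟨by simpa using hc, ?_⟩
          intro ch hch
          exact hcur ch (List.mem_reverse.mp hch)
        · exact hacc f h1
    · rw [pv_split₀_go_nws a s cur acc (by simpa using ha)] at he
      refine ih (a :: cur) acc ?_ (fun c h => hs c (List.mem_cons.mpr (Or.inr h))) hacc e he
      intro ch hch
      rcases List.mem_cons.mp hch with rfl | h1
      · exact ⟨hs ch List.mem_cons_self, by simpa using ha⟩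
      · exact hcur ch h1

theorem pv_split₀_mem (s e : List Char) (he : e ∈ PySem.Chars.split₀ s) :
    e ≠ [] ∧ ∀ c ∈ e, c ∈ s ∧ PySem.Chars.isspace c = false := by
  rw [PySem.Chars.split₀] at he
  exact pv_split₀_go_spec (· ∈ s) s [] [] (by simp) (fun c h => h) (by simp) e he

theorem pv_getTableName_chars (q pfx : List Char) (c : Char)
    (hc : c ∈ pvGetTableName q pfx) : c ∈ q ∧ PySem.Chars.isspace c = false := by
  unfold pvGetTableName at hc
  simp only at hc
  rcases h : PySem.Chars.split₀ (List.drop (PySem.Chars.find q pfx + (pfx.length : Int)).toNat q) with _ | ⟨t, ts⟩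
  · rw [h] at hc; simp at hc
  · rw [h] at hc
    have := pv_split₀_mem _ t (h ▸ List.mem_cons_self)
    obtain ⟨-, hall⟩ := this
    obtain ⟨hmem, hws⟩ := hall c hc
    exact ⟨List.mem_of_mem_drop hmem, hws⟩

def pvJ (E : List (List Char)) : List Char := List.intercalate [';'] E ++ [';']

theorem pv_join_eq (E : List (List Char)) :
    PySem.Chars.join [';'] E ++ [';'] = pvJ E := rfl

theorem pv_rstrip_semi (z : List Char) :
    PySem.Chars.rstrip (z ++ [';']) = z ++ [';'] := by
  rw [PySem.Chars.rstrip, List.reverse_append]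
  simp only [List.reverse_cons, List.reverse_nil, List.nil_append, List.singleton_append]
  rw [List.dropWhile_cons_of_neg (by decide)]
  simp

theorem pv_pvJ_cons (e : List Char) (E : List (List Char)) :
    pvJ (e :: E) = e ++ ';' :: (if E.isEmpty then [] else pvJ E) := by
  rcases E with _ | ⟨f, E'⟩
  · simp [pvJ, pv_intercalate_singleton]
  · simp only [List.isEmpty_cons, if_neg Bool.false_ne_true, pvJ,
      pv_intercalate_cons₂]
    simp

theorem pv_segs_elem (q s : List Char) (hs : s ∈ pvSegs q) : s ≠ [] ∧ ';' ∉ s := by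
  unfold pvSegs at hs
  obtain ⟨hmem, hne⟩ := List.mem_filter.mp hs
  rw [pv_splitOn_eq] at hmem
  exact ⟨by simpa using hne, pv_mem_splitOnP ';' _ s hmem⟩

-- _create_idempotent_insert_into_query's expansion, as a fragment list
def pvExpandInsert (s : List Char) : List (List Char) :=
  if PySem.Chars.isIn pvINS s then
    ["DELETE FROM ".toList ++ pvGetTableName s pvINS, s]
  else [s]

theorem pv_expand_elem (q x : List Char)
    (hx : x ∈ (pvSegs q).flatMap pvExpandInsert) : x ≠ [] ∧ ';' ∉ x := by
  obtain ⟨s, hs, hxs⟩ := List.mem_flatMap.mp hx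
  obtain ⟨hne, hfree⟩ := pv_segs_elem q s hs
  unfold pvExpandInsert at hxs
  by_cases hi : PySem.Chars.isIn pvINS s = true
  · rw [if_pos hi] at hxs
    rcases List.mem_cons.mp hxs with rfl | hxs'
    · refine ⟨by simp, ?_⟩
      intro hsemi
      rcases List.mem_append.mp hsemi with h1 | h1
      · simp at h1
      · exact absurd (pv_getTableName_chars s pvINS ';' h1).1 hfree
    · rcases List.mem_cons.mp hxs' with rfl | h2
      · exact ⟨hne, hfree⟩
      · simp at h2
  · rw [if_neg hi] at hxs
    rcases List.mem_cons.mp hxs with rfl | h2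
    · exact ⟨hne, hfree⟩
    · simp at h2

theorem pv_filter_nonempty (E : List (List Char)) (h : ∀ x ∈ E, x ≠ []) :
    E.filter (fun s => !s.isEmpty) = E := by
  apply List.filter_eq_self.mpr
  intro x hx
  simpa using h x hx

-- the merge pass re-splits the rejoined string: only the first fragment changes
theorem pv_segs_pvJ (e : List Char) (E : List (List Char))
    (helem : ∀ x ∈ e :: E, x ≠ [] ∧ ';' ∉ x) :
    pvSegs (pvJ (e :: E))
      = if (PySem.Chars.lstrip e).isEmpty then E else PySem.Chars.lstrip e :: E := by
  have hfree : ';' ∉ e := (helem e List.mem_cons_self).2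
  have hlfree : ∀ x ∈ PySem.Chars.lstrip e, ¬((· == ';') x = true) := by
    intro x hx hbeq
    have : x ∈ e := (List.dropWhile_sublist _).mem hx
    exact hfree (beq_iff_eq.mp hbeq ▸ this)
  unfold pvSegs
  rw [pv_pvJ_cons, pv_splitOn_eq, PySem.Chars.strip]
  have hl : PySem.Chars.lstrip (e ++ ';' :: (if E.isEmpty then [] else pvJ E))
      = (if (PySem.Chars.lstrip e).isEmpty then ([] : List Char) else PySem.Chars.lstrip e)
          ++ ';' :: (if E.isEmpty then [] else pvJ E) := by
    rw [PySem.Chars.lstrip, List.dropWhile_append]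
    by_cases hc : (List.dropWhile PySem.Chars.isspace e).isEmpty
    · rw [if_pos hc, List.dropWhile_cons_of_neg (by decide)]
      rw [PySem.Chars.lstrip] at *
      rw [if_pos hc]
      simp
    · rw [if_neg hc, PySem.Chars.lstrip, if_neg hc]
  rw [hl]
  have hsemiform : ∃ z, (if (PySem.Chars.lstrip e).isEmpty then ([] : List Char) else PySem.Chars.lstrip e)
      ++ ';' :: (if E.isEmpty then [] else pvJ E) = z ++ [';'] := by
    rcases E with _ | ⟨f, E'⟩
    · exact ⟨_, rfl⟩
    · refine ⟨(if (PySem.Chars.lstrip e).isEmpty then ([] : List Char) else PySem.Chars.lstrip e)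
        ++ ';' :: List.intercalate [';'] (f :: E'), ?_⟩
      simp [pvJ]
  obtain ⟨z, hz⟩ := hsemiform
  rw [hz, pv_rstrip_semi, ← hz]
  have hsplitTail : List.splitOnP (· == ';') (if E.isEmpty then [] else pvJ E)
      = E ++ [[]] := by
    rcases E with _ | ⟨f, E'⟩
    · simp [List.splitOnP_nil]
    · rw [if_neg (by simp), pvJ]
      exact pv_splitOnP_join ';' (f :: E') (by simp)
        (fun x hx => (helem x (List.mem_cons.mpr (Or.inr hx))).2)
  by_cases hc : (PySem.Chars.lstrip e).isEmpty
  · rw [if_pos hc, if_pos hc, List.nil_append]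
    rw [show (';' :: (if E.isEmpty then [] else pvJ E))
        = [] ++ ';' :: (if E.isEmpty then [] else pvJ E) from rfl]
    rw [List.splitOnP_first _ _ (by simp) ';' (by simp), hsplitTail]
    simp only [List.filter_cons, List.isEmpty_nil, Bool.not_true, List.filter_append]
    rw [pv_filter_nonempty E (fun x hx => (helem x (List.mem_cons.mpr (Or.inr hx))).1)]
    simp
  · rw [if_neg hc, if_neg hc]
    rw [List.splitOnP_first _ _ hlfree ';' (by simp), hsplitTail]
    simp only [List.filter_cons, List.filter_append]
    rw [pv_filter_nonempty E (fun x hx => (helem x (List.mem_cons.mpr (Or.inr hx))).1)]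
    simp [hc]

theorem pv_intercalate_sep_append (c : Char) (A B : List (List Char))
    (hA : A ≠ []) (hB : B ≠ []) :
    List.intercalate [c] (A ++ B) = List.intercalate [c] A ++ c :: List.intercalate [c] B := by
  induction A with
  | nil => simp at hA
  | cons a A ih =>
    rcases A with _ | ⟨a', A'⟩
    · rw [pv_intercalate_singleton, List.singleton_append, pv_intercalate_cons c a B hB]
    · rw [List.cons_append, pv_intercalate_cons c a _ (by simp), pv_intercalate_cons₂,
        ih (by simp)]
      simp

theorem pv_intercalate_flatMap (c : Char) (g : List Char → List (List Char))
    (l : List (List Char)) (hg : ∀ s ∈ l, g s ≠ []) :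
    List.intercalate [c] (l.map fun s => List.intercalate [c] (g s))
      = List.intercalate [c] (l.flatMap g) := by
  induction l with
  | nil => simp
  | cons s l ih =>
    rcases l with _ | ⟨s', l'⟩
    · simp [pv_intercalate_singleton]
    · have hflat : (s' :: l').flatMap g ≠ [] := by
        have := hg s' (by simp)
        simp only [List.flatMap_cons]
        intro habs
        exact this (List.append_eq_nil_iff.mp habs).1
      rw [List.map_cons, pv_intercalate_cons c _ _ (by simp),
        List.flatMap_cons, pv_intercalate_sep_append c (g s) _ (hg s List.mem_cons_self) hflat,
        ih (fun x hx => hg x (List.mem_cons.mpr (Or.inr hx)))]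

theorem pv_intercalate_flatMap_congr (g1 g2 : List Char → List (List Char))
    (l : List (List Char))
    (h : ∀ s ∈ l, g1 s ≠ [] ∧ g2 s ≠ [] ∧
      List.intercalate [';'] (g1 s) = List.intercalate [';'] (g2 s)) :
    List.intercalate [';'] (l.flatMap g1) = List.intercalate [';'] (l.flatMap g2) := by
  rw [← pv_intercalate_flatMap ';' g1 l (fun s hs => (h s hs).1),
    ← pv_intercalate_flatMap ';' g2 l (fun s hs => (h s hs).2.1)]
  exact congrArg _ (List.map_congr_left fun s hs => (h s hs).2.2)

theorem pv_flatMap_congr (g1 g2 : List Char → List (List Char)) (l : List (List Char))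
    (h : ∀ s ∈ l, g1 s = g2 s) : l.flatMap g1 = l.flatMap g2 := by
  induction l with
  | nil => rfl
  | cons s l ih =>
    rw [List.flatMap_cons, List.flatMap_cons, h s List.mem_cons_self,
      ih (fun x hx => h x (List.mem_cons.mpr (Or.inr hx)))]

theorem pv_insertIdem_intercalate (s : List Char) :
    pvInsertIntoIdem s = List.intercalate [';'] (pvExpandInsert s) := by
  unfold pvInsertIntoIdem pvExpandInsert
  by_cases hi : PySem.Chars.isIn pvINS s = true
  · rw [if_pos hi, if_pos hi, pv_intercalate_cons₂, pv_intercalate_singleton]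
    simp
  · rw [if_neg hi, if_neg hi, pv_intercalate_singleton]

theorem pv_pass1_eq (q : List Char) :
    PySem.Chars.join [';'] ((pvSegs q).map pvInsertIntoIdem) ++ [';']
      = pvJ ((pvSegs q).flatMap pvExpandInsert) := by
  rw [pv_join_eq, pvJ, pvJ]
  have : (pvSegs q).map pvInsertIntoIdem
      = (pvSegs q).map fun s => List.intercalate [';'] (pvExpandInsert s) :=
    List.map_congr_left fun s _ => pv_insertIdem_intercalate s
  rw [this, pv_intercalate_flatMap ';' pvExpandInsert (pvSegs q)
    (fun s _ => by unfold pvExpandInsert; split <;> simp)]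

theorem pv_no_merge_in_delete (t : List Char)
    (hall : ∀ c ∈ t, PySem.Chars.isspace c = false) :
    ¬ (pvMERGE <:+: "DELETE FROM ".toList ++ t) := by
  rintro ⟨u, v, huv⟩
  have h12 : (u ++ (pvMERGE ++ v))[u.length + 12]? = some ' ' := by
    rw [List.getElem?_append_right (by omega)]
    have : u.length + 12 - u.length = 12 := by omega
    rw [this, List.getElem?_append_left (by decide)]
    rfl
  rw [show u ++ (pvMERGE ++ v) = u ++ pvMERGE ++ v by simp, huv] at h12
  rw [List.getElem?_append_right (by simp)] at h12
  have : u.length + 12 - ("DELETE FROM ".toList).length = u.length := by simp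
  rw [this] at h12
  have hmem : ' ' ∈ t := List.mem_of_getElem? h12
  have := hall ' ' hmem
  simp [PySem.Chars.isspace] at this

theorem pv_infix_segs_iff (q : List Char) (ph pl : Char) (pt pi : List Char)
    (hdec : ph :: pt = pi ++ [pl])
    (hh : PySem.Chars.isspace ph = false) (hl : PySem.Chars.isspace pl = false)
    (hfree : ';' ∉ ph :: pt) :
    (ph :: pt) <:+: q ↔ ∃ s ∈ pvSegs q, (ph :: pt) <:+: s := by
  rw [pv_strip_infix_iff ph pl pt pi q hdec hh hl]
  have hq : PySem.Chars.strip q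
      = List.intercalate [';'] (List.splitOnP (· == ';') (PySem.Chars.strip q)) := by
    have := List.intercalate_splitOn (PySem.Chars.strip q) ';'
    rw [List.splitOn.eq_1] at this
    exact this.symm
  rw [hq, pv_infix_intercalate_iff ';' _ _ (by simp) hfree]
  unfold pvSegs
  rw [pv_splitOn_eq]
  constructor
  · rintro ⟨s, hs, hps⟩
    refine ⟨s, List.mem_filter.mpr ⟨hs, ?_⟩, hps⟩
    have : s ≠ [] := fun habs => by
      rw [habs] at hps
      simp [List.eq_nil_of_infix_nil hps] at *
    simpa using this
  · rintro ⟨s, hs, hps⟩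
    exact ⟨s, (List.mem_filter.mp hs).1, hps⟩

theorem pv_ins_segs (q : List Char) : pvINS <:+: q ↔ ∃ s ∈ pvSegs q, pvINS <:+: s := by
  have h : pvINS = 'I' :: "NSERT INTO".toList := by decide
  rw [h]
  exact pv_infix_segs_iff q 'I' 'O' "NSERT INTO".toList "INSERT INT".toList
    (by decide) (by decide) (by decide) (by decide)

theorem pv_merge_segs (q : List Char) : pvMERGE <:+: q ↔ ∃ s ∈ pvSegs q, pvMERGE <:+: s := by
  have h : pvMERGE = 'C' :: "REATE MERGE TABLE".toList := by decide
  rw [h]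
  exact pv_infix_segs_iff q 'C' 'E' "REATE MERGE TABLE".toList
    "CREATE MERGE TABL".toList (by decide) (by decide) (by decide) (by decide)

theorem pv_seg_no_ins (q s : List Char) (hs : s ∈ pvSegs q)
    (h : PySem.Chars.isIn pvINS q = false) : PySem.Chars.isIn pvINS s = false := by
  rw [PySem.Chars.isIn_eq_false_iff] at h ⊢
  exact fun habs => h ((pv_ins_segs q).mpr ⟨s, hs, habs⟩)

theorem pv_seg_no_merge (q s : List Char) (hs : s ∈ pvSegs q)
    (h : PySem.Chars.isIn pvMERGE q = false) : PySem.Chars.isIn pvMERGE s = false := by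
  rw [PySem.Chars.isIn_eq_false_iff] at h ⊢
  exact fun habs => h ((pv_merge_segs q).mpr ⟨s, hs, habs⟩)

theorem pv_merge_guard (q : List Char) :
    PySem.Chars.isIn pvMERGE (pvJ ((pvSegs q).flatMap pvExpandInsert))
      = PySem.Chars.isIn pvMERGE q := by
  have hEx : (∃ x ∈ (pvSegs q).flatMap pvExpandInsert, pvMERGE <:+: x)
      ↔ ∃ s ∈ pvSegs q, pvMERGE <:+: s := by
    constructor
    · rintro ⟨x, hx, hpx⟩
      obtain ⟨s, hs, hxs⟩ := List.mem_flatMap.mp hx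
      unfold pvExpandInsert at hxs
      by_cases hi : PySem.Chars.isIn pvINS s = true
      · rw [if_pos hi] at hxs
        rcases List.mem_cons.mp hxs with rfl | hxs'
        · exact absurd hpx (pv_no_merge_in_delete _
            (fun c hc => (pv_getTableName_chars s pvINS c hc).2))
        · rcases List.mem_cons.mp hxs' with rfl | h2
          · exact ⟨x, hs, hpx⟩
          · simp at h2
      · rw [if_neg hi] at hxs
        rcases List.mem_cons.mp hxs with rfl | h2
        · exact ⟨x, hs, hpx⟩
        · simp at h2
    · rintro ⟨s, hs, hps⟩
      refine ⟨s, List.mem_flatMap.mpr ⟨s, hs, ?_⟩, hps⟩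
      unfold pvExpandInsert
      split <;> simp
  have hiff : pvMERGE <:+: pvJ ((pvSegs q).flatMap pvExpandInsert) ↔ pvMERGE <:+: q := by
    rw [pvJ, pv_infix_join_iff ';' pvMERGE _ (by decide) (by decide)]
    exact hEx.trans (pv_merge_segs q).symm
  by_cases hb : PySem.Chars.isIn pvMERGE q = true
  · rw [hb]
    exact (PySem.Chars.isIn_iff_infix _ _).mpr
      (hiff.mpr ((PySem.Chars.isIn_iff_infix _ _).mp hb))
  · rw [Bool.not_eq_true] at hb
    rw [hb]
    rw [Bool.eq_false_iff]
    intro habs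
    exact (Bool.eq_false_iff.mp hb)
      ((PySem.Chars.isIn_iff_infix _ _).mpr (hiff.mp ((PySem.Chars.isIn_iff_infix _ _).mp habs)))

theorem pv_flatMap_ne_nil (q : List Char) (hI : PySem.Chars.isIn pvINS q = true) :
    (pvSegs q).flatMap pvExpandInsert ≠ [] := by
  obtain ⟨s, hs, -⟩ := (pv_ins_segs q).mp ((PySem.Chars.isIn_iff_infix _ _).mp hI)
  intro habs
  have := List.flatMap_eq_nil_iff.mp habs s hs
  unfold pvExpandInsert at this
  revert this
  split <;> simp

theorem pv_lstrip_of_head (c : Char) (t : List Char) (h : PySem.Chars.isspace c = false) :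
    PySem.Chars.lstrip (c :: t) = c :: t := by
  rw [PySem.Chars.lstrip, List.dropWhile_cons_of_neg (by simp [h])]

-- replace is a no-op when the pattern is absent
theorem pv_replace_go_noop (old new : List Char) :
    ∀ (fuel : Nat) (l acc : List Char), ¬ old <:+: l →
      PySem.Chars.replace.go old new fuel l acc = acc.reverse ++ l := by
  intro fuel
  induction fuel with
  | zero =>
    intro l acc _
    rw [PySem.Chars.replace.go]
  | succ fuel ih =>
    intro l acc h
    cases l with
    | nil => rw [PySem.Chars.replace.go]; simp; omega
    | cons c t =>
      rw [PySem.Chars.replace.go]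
      rw [if_neg (by
        intro habs
        exact h (List.IsPrefix.isInfix (List.isPrefixOf_iff_prefix.mp habs)))]
      rw [ih t (c :: acc) (fun habs => h (habs.trans (List.suffix_cons c t).isInfix))]
      simp

theorem pv_replace_noop (s old new : List Char) (h : PySem.Chars.isIn old s = false) :
    PySem.Chars.replace s old new = s := by
  have hne : old ≠ [] := by
    rintro rfl
    rw [PySem.Chars.isIn_nil] at h
    simp at h
  rw [PySem.Chars.replace, if_neg (by simpa using hne),
    pv_replace_go_noop old new s.length s [] ((PySem.Chars.isIn_eq_false_iff _ _).mp h)]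
  simp

theorem pv_isIn_false_of_prefix (pfx pat r : List Char) (hp : pfx <+: pat)
    (h : PySem.Chars.isIn pfx r = false) : PySem.Chars.isIn pat r = false := by
  rw [PySem.Chars.isIn_eq_false_iff] at h ⊢
  exact fun habs => h (hp.isInfix.trans habs)

theorem pv_drop_tail_eq (r : List Char) :
    (if PySem.Chars.isIn "DROP".toList r = true then
      PySem.Chars.replace (PySem.Chars.replace (PySem.Chars.replace r
        "DROP FUNCTION".toList "DROP FUNCTION IF EXISTS".toList)
        "DROP TABLE".toList "DROP TABLE IF EXISTS".toList)
        "DROP VIEW".toList "DROP VIEW IF EXISTS".toList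
    else r)
      = PySem.Chars.replace (PySem.Chars.replace (PySem.Chars.replace r
          "DROP FUNCTION".toList "DROP FUNCTION IF EXISTS".toList)
          "DROP TABLE".toList "DROP TABLE IF EXISTS".toList)
          "DROP VIEW".toList "DROP VIEW IF EXISTS".toList := by
  by_cases hD : PySem.Chars.isIn "DROP".toList r = true
  · rw [if_pos hD]
  · rw [Bool.not_eq_true] at hD
    rw [if_neg (by intro habs; rw [hD] at habs; simp at habs)]
    rw [pv_replace_noop r "DROP FUNCTION".toList "DROP FUNCTION IF EXISTS".toList
        (pv_isIn_false_of_prefix _ _ r ⟨" FUNCTION".toList, by decide⟩ hD),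
      pv_replace_noop r "DROP TABLE".toList "DROP TABLE IF EXISTS".toList
        (pv_isIn_false_of_prefix _ _ r ⟨" TABLE".toList, by decide⟩ hD),
      pv_replace_noop r "DROP VIEW".toList "DROP VIEW IF EXISTS".toList
        (pv_isIn_false_of_prefix _ _ r ⟨" VIEW".toList, by decide⟩ hD)]

-- A's guarded replace blocks equal B's flat table of unconditional replaces
theorem pv_repl_eq (r : List Char) :
    pvReplacePhaseA r
      = pvRepl.foldl (fun acc ov => PySem.Chars.replace acc ov.1 ov.2) r := by
  unfold pvReplacePhaseA
  simp only [pvRepl, List.foldl_cons, List.foldl_nil]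
  by_cases hC : PySem.Chars.isIn "CREATE".toList r = true
  · simp only [hC, if_true]
    exact pv_drop_tail_eq _
  · rw [Bool.not_eq_true] at hC
    simp only [hC, Bool.false_eq_true, if_false]
    have hc4 : PySem.Chars.replace (PySem.Chars.replace (PySem.Chars.replace
        (PySem.Chars.replace r "CREATE TABLE".toList "CREATE TABLE IF NOT EXISTS".toList)
        "CREATE REMOTE TABLE".toList "CREATE REMOTE TABLE IF NOT EXISTS".toList)
        "CREATE VIEW".toList "CREATE OR REPLACE VIEW".toList)
        "CREATE FUNCTION".toList "CREATE OR REPLACE FUNCTION".toList = r := by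
      rw [pv_replace_noop r "CREATE TABLE".toList "CREATE TABLE IF NOT EXISTS".toList
          (pv_isIn_false_of_prefix _ _ r ⟨" TABLE".toList, by decide⟩ hC),
        pv_replace_noop r "CREATE REMOTE TABLE".toList "CREATE REMOTE TABLE IF NOT EXISTS".toList
          (pv_isIn_false_of_prefix _ _ r ⟨" REMOTE TABLE".toList, by decide⟩ hC),
        pv_replace_noop r "CREATE VIEW".toList "CREATE OR REPLACE VIEW".toList
          (pv_isIn_false_of_prefix _ _ r ⟨" VIEW".toList, by decide⟩ hC),
        pv_replace_noop r "CREATE FUNCTION".toList "CREATE OR REPLACE FUNCTION".toList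
          (pv_isIn_false_of_prefix _ _ r ⟨" FUNCTION".toList, by decide⟩ hC)]
    rw [hc4, pv_drop_tail_eq r]

-- per-statement: A's merge transform on the expanded fragments joins to B's fragment list
theorem pv_seg_merge_eq (s : List Char) :
    List.intercalate [';'] ((pvExpandInsert s).map pvMergeTableIdem)
      = List.intercalate [';'] (pvFragOut s) := by
  unfold pvExpandInsert pvFragOut
  by_cases hi : PySem.Chars.isIn pvINS s = true
  · have hdel : PySem.Chars.isIn pvMERGE
        ("DELETE FROM ".toList ++ pvGetTableName s pvINS) = false :=
      (PySem.Chars.isIn_eq_false_iff _ _).mpr (pv_no_merge_in_delete _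
        (fun c hc => (pv_getTableName_chars s pvINS c hc).2))
    by_cases hm : PySem.Chars.isIn pvMERGE s = true
    · simp only [hi, hm, if_true, List.map_cons, List.map_nil]
      unfold pvMergeTableIdem
      simp only [hdel, Bool.false_eq_true, if_false, hm, if_true]
      simp [pv_intercalate_cons₂, pv_intercalate_singleton]
    · rw [Bool.not_eq_true] at hm
      simp only [hi, hm, if_true, Bool.false_eq_true, if_false, List.map_cons, List.map_nil]
      unfold pvMergeTableIdem
      simp only [hdel, hm, Bool.false_eq_true, if_false]
      simp
  · rw [Bool.not_eq_true] at hi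
    by_cases hm : PySem.Chars.isIn pvMERGE s = true
    · simp only [hi, hm, Bool.false_eq_true, if_false, if_true, List.map_cons, List.map_nil]
      unfold pvMergeTableIdem
      simp only [hm, if_true]
      simp [pv_intercalate_cons₂, pv_intercalate_singleton]
    · rw [Bool.not_eq_true] at hm
      simp only [hi, hm, Bool.false_eq_true, if_false, List.map_cons, List.map_nil]
      unfold pvMergeTableIdem
      simp only [hm, Bool.false_eq_true, if_false]
      simp

theorem pv_seg_merge_only (s : List Char) (hi : PySem.Chars.isIn pvINS s = false) :
    List.intercalate [';'] (pvFragOut s) = pvMergeTableIdem s := by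
  unfold pvFragOut pvMergeTableIdem
  by_cases hm : PySem.Chars.isIn pvMERGE s = true
  · simp only [hi, hm, Bool.false_eq_true, if_false, if_true, List.nil_append]
    simp [pv_intercalate_cons₂, pv_intercalate_singleton]
  · rw [Bool.not_eq_true] at hm
    simp only [hi, hm, Bool.false_eq_true, if_false, List.nil_append]
    rw [pv_intercalate_singleton]

theorem pv_fragOut_ne_nil (s : List Char) : pvFragOut s ≠ [] := by
  unfold pvFragOut
  split <;> split <;> simp

theorem pv_fragOut_no_merge (s : List Char) (hm : PySem.Chars.isIn pvMERGE s = false) :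
    pvFragOut s = pvExpandInsert s := by
  unfold pvFragOut pvExpandInsert
  simp only [hm, Bool.false_eq_true, if_false]
  split <;> simp

-- the first fragment of the rejoined string starts with a non-space character
theorem pv_head_lstrip (q e : List Char) (E : List (List Char))
    (hpre : ((pvSegs q).head?.all
      (fun s => PySem.Chars.isIn pvINS s ||
        s.head?.all (fun c => !PySem.Chars.isspace c))) = true)
    (hE : (pvSegs q).flatMap pvExpandInsert = e :: E) :
    PySem.Chars.lstrip e = e ∧ e ≠ [] := by
  cases hsegs : pvSegs q with
  | nil => rw [hsegs] at hE; simp at hE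
  | cons s0 rest =>
    rw [hsegs] at hE hpre
    rw [List.flatMap_cons] at hE
    have hs0ne : s0 ≠ [] := (pv_segs_elem q s0 (hsegs ▸ List.mem_cons_self)).1
    simp only [List.head?_cons, Option.all_some] at hpre
    unfold pvExpandInsert at hE
    by_cases hi : PySem.Chars.isIn pvINS s0 = true
    · rw [if_pos hi] at hE
      simp only [List.cons_append] at hE
      obtain ⟨rfl, -⟩ := List.cons.injEq .. ▸ hE
      constructor
      · rw [show "DELETE FROM ".toList ++ pvGetTableName s0 pvINS
            = 'D' :: ("ELETE FROM ".toList ++ pvGetTableName s0 pvINS) from rfl]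
        exact pv_lstrip_of_head 'D' _ (by decide)
      · simp
    · rw [if_neg hi] at hE
      simp only [List.cons_append] at hE
      obtain ⟨rfl, -⟩ := List.cons.injEq .. ▸ hE
      rw [Bool.not_eq_true] at hi
      rw [hi] at hpre
      simp only [Bool.false_or] at hpre
      obtain ⟨c, t, rfl⟩ := List.exists_cons_of_ne_nil hs0ne
      simp only [List.head?_cons, Option.all_some, Bool.not_eq_true'] at hpre
      exact ⟨pv_lstrip_of_head c t hpre, by simp⟩

-- the string built by A's two passes equals B's single-pass build
theorem pv_build_eq (q : List Char)
    (hpre : PySem.Chars.isIn pvINS q = true → PySem.Chars.isIn pvMERGE q = true →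
      ((pvSegs q).head?.all
        (fun s => PySem.Chars.isIn pvINS s ||
          s.head?.all (fun c => !PySem.Chars.isspace c))) = true) :
    pvBuildA q
      = (if PySem.Chars.isIn pvINS q || PySem.Chars.isIn pvMERGE q then
          PySem.Chars.join [';'] ((pvSegs q).flatMap pvFragOut) ++ [';']
        else q) := by
  unfold pvBuildA
  by_cases hI : PySem.Chars.isIn pvINS q = true
  · simp only [hI, if_true, Bool.true_or]
    rw [pv_pass1_eq q, pv_merge_guard q]
    by_cases hM : PySem.Chars.isIn pvMERGE q = true
    · simp only [hM, if_true]
      obtain ⟨e, E, hE⟩ := List.exists_cons_of_ne_nil (pv_flatMap_ne_nil q hI)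
      obtain ⟨hls, hene⟩ := pv_head_lstrip q e E (hpre hI hM) hE
      rw [hE, pv_segs_pvJ e E (fun x hx => pv_expand_elem q x (hE ▸ hx)), hls,
        if_neg (by simpa using hene), ← hE]
      rw [pv_join_eq, pv_join_eq]
      unfold pvJ
      congr 1
      rw [List.map_flatMap]
      exact pv_intercalate_flatMap_congr _ _ _ (fun s _ =>
        ⟨by unfold pvExpandInsert; split <;> simp, pv_fragOut_ne_nil s, pv_seg_merge_eq s⟩)
    · rw [Bool.not_eq_true] at hM
      simp only [hM, Bool.false_eq_true, if_false]
      rw [pv_flatMap_congr pvFragOut pvExpandInsert (pvSegs q)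
        (fun s hs => pv_fragOut_no_merge s (pv_seg_no_merge q s hs hM))]
      rw [pv_join_eq]
  · rw [Bool.not_eq_true] at hI
    simp only [hI, Bool.false_eq_true, if_false, Bool.false_or]
    by_cases hM : PySem.Chars.isIn pvMERGE q = true
    · simp only [hM, if_true]
      rw [pv_join_eq, pv_join_eq]
      unfold pvJ
      congr 1
      rw [← pv_intercalate_flatMap ';' pvFragOut (pvSegs q) (fun s _ => pv_fragOut_ne_nil s)]
      exact congrArg _ (List.map_congr_left fun s hs =>
        (pv_seg_merge_only s (pv_seg_no_ins q s hs hI)).symm)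
    · rw [Bool.not_eq_true] at hM
      simp only [hM, Bool.false_eq_true, if_false]

-- ===== VERDICT (by name: the statement is the Claim_ definition above) =====
theorem create_idempotent_query_py_spec : Claim_equal_create_idempotent_query_py := by
  intro query _ hpre
  unfold Spec_create_idempotent_query_py create_idempotent_query_py
    create_idempotent_query_py_alt create_idempotent_query_py_altAux
  obtain ⟨-, hpre2⟩ := hpre
  rw [pv_repl_eq, pv_build_eq query.toList hpre2]
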